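-- pv_equiv track=rewrite | github.com/yujunhan111/test | pretrain/get_patient_data.py | deduplicate_codes
-- ===== SOURCE A (Python) =====
-- def deduplicate_codes(codes, times):
--     """
--     对代码去重，保留最早出现的时间
--
--     参数:
--     codes: 代码列表
--     times: 对应的时间列表
--
--     返回:
--     dedup_codes: 去重后的代码列表
--     dedup_times: 去重后的时间列表
--     """
--     if not codes:
--         return [], []
--     code_time_dict = {}
--     for code, time in zip(codes, times):
--         if code not in code_time_dict or time < code_time_dict[code]:
--             code_time_dict[code] = time
--     dedup_codes = list(code_time_dict.keys())
--     dedup_times = [code_time_dict[code] for code in dedup_codes]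
--     return dedup_codes, dedup_times
-- ===== SOURCE B (Python) =====
-- def deduplicate_codes(codes, times):
--     groups = {}
--     for code, time in zip(codes, times):
--         groups.setdefault(code, []).append(time)
--     dedup_codes = list(groups.keys())
--     dedup_times = [min(ts) for ts in groups.values()]
--     return dedup_codes, dedup_times
-- ===== Notes on version B (the rewrite author's own statement) =====
-- stated objective: idiomatic
-- what changed: Instead of maintaining a running minimum per code inside the loop, B groups all times per code into lists (first-appearance key order) and takes min() of each group in a separate reduction pass.
import Mathlib
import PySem

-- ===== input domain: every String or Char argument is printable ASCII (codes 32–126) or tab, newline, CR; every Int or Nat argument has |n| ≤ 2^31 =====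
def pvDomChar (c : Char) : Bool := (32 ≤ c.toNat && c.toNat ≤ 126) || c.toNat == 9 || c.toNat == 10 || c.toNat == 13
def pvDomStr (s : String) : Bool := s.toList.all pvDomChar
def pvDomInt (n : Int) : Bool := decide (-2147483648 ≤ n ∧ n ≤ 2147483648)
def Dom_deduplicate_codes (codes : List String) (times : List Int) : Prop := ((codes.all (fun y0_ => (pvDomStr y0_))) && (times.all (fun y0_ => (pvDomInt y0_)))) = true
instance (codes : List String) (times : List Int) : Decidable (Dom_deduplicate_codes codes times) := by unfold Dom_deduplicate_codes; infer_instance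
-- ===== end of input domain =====

-- B groups all times per code into lists and takes the minimum of each group in a
-- separate pass, instead of A's running minimum kept inside the loop (idiomatic rewrite).


-- ===== PORT A =====
-- A's loop body: `if code not in code_time_dict or time < code_time_dict[code]: code_time_dict[code] = time`
-- (`code_time_dict[code]` is only read when `code in code_time_dict`, so `(get? …).getD 0` is exact there)
def stepA (d : PySem.Dict String Int) (p : String × Int) : PySem.Dict String Int :=
  if !(d.contains p.1) || decide (p.2 < (d.get? p.1).getD 0) then d.insert p.1 p.2 else d

def deduplicate_codes (codes : List String) (times : List Int) : List String × List Int :=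
  if codes = [] then ([], [])
  else
    let d := (codes.zip times).foldl stepA PySem.Dict.empty
    let dedup_codes := d.keys
    (dedup_codes, dedup_codes.map (fun c => (d.get? c).getD 0))

-- ===== PORT B =====
-- `groups.setdefault(code, []).append(time)` is `groups[code] = groups.get(code, []) + [time]`,
-- i.e. Dict.modify with default []; `min(ts)` is PySem.List.min? (every group is nonempty, so
-- the `.getD 0` default is unreachable)
def deduplicate_codes_alt (codes : List String) (times : List Int) : List String × List Int :=
  let groups := (codes.zip times).foldl
    (fun g p => g.modify p.1 [] (fun ts => ts ++ [p.2])) PySem.Dict.empty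
  (groups.keys, groups.values.map (fun ts => (PySem.List.min? ts (fun t => t)).getD 0))

-- ===== PRECONDITION & SPEC =====
def Spec_deduplicate_codes (codes : List String) (times : List Int) (out : List String × List Int) : Prop := out = deduplicate_codes_alt codes times
instance (codes : List String) (times : List Int) (out : List String × List Int) : Decidable (Spec_deduplicate_codes codes times out) := by unfold Spec_deduplicate_codes; infer_instance

-- ===== CLAIM (what is proved, stated in full; the proofs are below) =====
def Claim_equal_deduplicate_codes : Prop := ∀ (codes : List String) (times : List Int), Dom_deduplicate_codes codes times → Spec_deduplicate_codes codes times (deduplicate_codes codes times)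

-- ===== LEMMAS AND PROOFS =====

lemma keys_stepA (d : PySem.Dict String Int) (p : String × Int) :
    (stepA d p).keys = PySem.Set.add d.keys p.1 := by
  unfold stepA
  simp only [PySem.Set.add, PySem.Set.contains]
  by_cases hc : d.contains p.1 = true
  · have hm : d.keys.contains p.1 = true := by
      simpa using (PySem.Dict.contains_iff_mem_keys d p.1).mp hc
    simp only [hm, if_true]
    split_ifs with h
    · exact PySem.Dict.keys_insert_of_contains d p.2 hc
    · rfl
  · have hc' : d.contains p.1 = false := by simpa using hc
    have hm : d.keys.contains p.1 = false := by
      simp only [List.contains_eq_mem, decide_eq_false_iff_not]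
      exact fun hmem => hc ((PySem.Dict.contains_iff_mem_keys d p.1).mpr hmem)
    simp only [hm, Bool.false_eq_true, if_false]
    simp only [hc', Bool.not_false, Bool.true_or, if_pos]
    exact PySem.Dict.keys_insert_of_not_contains d p.2 hc'

lemma keys_foldA (l : List (String × Int)) :
    ∀ d : PySem.Dict String Int,
      (l.foldl stepA d).keys = PySem.Set.update d.keys (l.map (·.1)) := by
  induction l with
  | nil => intro d; rfl
  | cons p l ih =>
      intro d
      simp only [List.foldl_cons, List.map_cons]
      rw [ih (stepA d p), keys_stepA]
      rfl

-- the running-min step A's loop performs, as a fold step over the grouped times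
def runMin (o : Option Int) (t : Int) : Option Int :=
  match o with
  | none => some t
  | some m => if t < m then some t else some m

lemma get?_stepA (d : PySem.Dict String Int) (p : String × Int) (c : String) :
    (stepA d p).get? c = if p.1 == c then runMin (d.get? c) p.2 else d.get? c := by
  unfold stepA runMin
  by_cases hpc : p.1 = c
  · subst hpc
    simp only [beq_self_eq_true, if_pos]
    cases hg : d.get? p.1 with
    | none =>
        have hc : d.contains p.1 = false := by
          rw [PySem.Dict.contains_eq_isSome_get?, hg]; rfl
        simp [hc, PySem.Dict.get?_insert_self]
    | some m =>
        have hc : d.contains p.1 = true := by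
          rw [PySem.Dict.contains_eq_isSome_get?, hg]; rfl
        simp only [hc, Bool.not_true, Bool.false_or, Option.getD_some]
        by_cases hlt : p.2 < m
        · simp [hlt, PySem.Dict.get?_insert_self]
        · simp [hlt, hg]
  · have hbe : (p.1 == c) = false := by simpa using hpc
    rw [hbe]
    simp only [Bool.false_eq_true, if_false]
    split_ifs with h
    · exact PySem.Dict.get?_insert_of_ne d p.2 (fun h' => hpc h'.symm)
    · rfl

lemma get?_foldA (l : List (String × Int)) :
    ∀ (d : PySem.Dict String Int) (c : String),
      (l.foldl stepA d).get? c =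
        ((l.filter (fun p => p.1 == c)).map (·.2)).foldl runMin (d.get? c) := by
  induction l with
  | nil => intro d c; rfl
  | cons p l ih =>
      intro d c
      simp only [List.foldl_cons]
      rw [ih (stepA d p) c, get?_stepA]
      by_cases hpc : (p.1 == c) = true
      · simp [hpc]
      · simp [hpc]

lemma runMin_foldl_eq_min? (ts : List Int) :
    ts.foldl runMin none = PySem.List.min? ts (fun t => t) := by
  unfold PySem.List.min?
  congr 1
  funext o t
  cases o <;> rfl

-- ===== VERDICT (by name: the statement is the Claim_ definition above) =====
theorem deduplicate_codes_spec : Claim_equal_deduplicate_codes := by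
  intro codes times _
  unfold Spec_deduplicate_codes deduplicate_codes deduplicate_codes_alt
  by_cases hnil : codes = []
  · subst hnil; rfl
  · rw [if_neg hnil]
    dsimp only
    set l := codes.zip times with hl
    set dA := l.foldl stepA PySem.Dict.empty with hdA
    set g := l.foldl (fun g p => g.modify p.1 [] (fun ts => ts ++ [p.2])) PySem.Dict.empty with hg
    -- keys agree
    have hkB : g.keys = PySem.Set.update [] (l.map (·.1)) := by
      rw [hg]
      exact PySem.Dict.keys_foldl_modify_key l (·.1) [] (fun d x ts => ts ++ [x.2]) PySem.Dict.empty
    have hkA : dA.keys = PySem.Set.update [] (l.map (·.1)) := by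
      rw [hdA, keys_foldA]; rfl
    have hkeys : dA.keys = g.keys := by rw [hkA, hkB]
    -- values agree
    have hnd : g.keys.Nodup := by
      rw [hg]
      exact PySem.Dict.nodup_keys_foldl_modify_key l (·.1) [] (fun d x ts => ts ++ [x.2])
        PySem.Dict.empty (by simp)
    have hvals : g.values = g.keys.map (fun k => g.getD k []) :=
      PySem.Dict.values_eq_map_keys g hnd []
    have hgetD : ∀ c, g.getD c [] = (l.filter (fun p => p.1 == c)).map (·.2) := by
      intro c
      rw [hg]
      simpa using PySem.Dict.getD_foldl_modify_append l PySem.Dict.empty c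
    have hentry : ∀ c, (dA.get? c).getD 0 =
        (PySem.List.min? (g.getD c []) (fun t => t)).getD 0 := by
      intro c
      rw [hdA, get?_foldA, hgetD c]
      rw [show (PySem.Dict.empty : PySem.Dict String Int).get? c = none from rfl]
      rw [runMin_foldl_eq_min?]
    refine Prod.ext hkeys ?_
    rw [hvals, List.map_map, ← hkeys, List.map_congr_left]
    intro c _
    simpa using hentry c
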